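-- pv_equiv track=rewrite | github.com/jacopoM28/Python_Scripts | TE_scripts/BlastX_TE_Anno.py | ckeckList
-- ===== SOURCE A (Python) =====
-- def ckeckList(lst):
--
--     ele = lst[0]
--     chk = True
--     ClassList = []
--     #If the element has only one hit just take that one as annotation
--     if len(lst) == 1 :
--         anno = ele
--     else :
--         # Comparing each element with first item...
--         for item in lst:
--             ClassList.append(item.split("/")[0])
--             if ele != item:
--                 chk = False
--                 ClassList.append(item.split("/")[0])
--         #If the second item is already different from the first one, try to check the annotation at the
--         #class-level
--         if chk == False :
--             ele = ClassList[0]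
--             for item in ClassList :
--                 #If also class-level classification is incosistent annotate it as an Unknown
--                 if ele != item :
--                     anno = "Unkown"
--                 #If class-level classification is cosistent annotate it th the class level
--                 else :
--                     anno = ele
--         #If all element of the list have the same annotation use it!
--         else :
--             anno = ele
--     return anno
-- ===== SOURCE B (Python) =====
-- def ckeckList(lst):
--     if all(x == lst[0] for x in lst):
--         return lst[0]
--     classes = [x.split("/")[0] for x in lst]
--     if all(c == classes[0] for c in classes):
--         return classes[0]
--     return "Unkown"
-- ===== Notes on version B (the rewrite author's own statement) =====
-- stated objective: simpler
-- what changed: Replaced the two accumulator loops and the ClassList double-append with two short-circuiting all() checks over the list and its mapped classes (no intermediate ClassList), returning the shared annotation, the shared class, or 'Unkown'.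
-- intended difference: On lists whose hits are not all identical but whose first and last classes agree while some middle class differs (and the first class is not itself 'Unkown'), A's last-wins loop returns the first class even though class-level classification is inconsistent, while B returns 'Unkown' as A's own comment says inconsistent classes should be. — e.g. on ckeckList(["DNA/hAT", "LINE/L1", "DNA/Tc1"]): A returns "DNA", B returns "Unkown"
import Mathlib
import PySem

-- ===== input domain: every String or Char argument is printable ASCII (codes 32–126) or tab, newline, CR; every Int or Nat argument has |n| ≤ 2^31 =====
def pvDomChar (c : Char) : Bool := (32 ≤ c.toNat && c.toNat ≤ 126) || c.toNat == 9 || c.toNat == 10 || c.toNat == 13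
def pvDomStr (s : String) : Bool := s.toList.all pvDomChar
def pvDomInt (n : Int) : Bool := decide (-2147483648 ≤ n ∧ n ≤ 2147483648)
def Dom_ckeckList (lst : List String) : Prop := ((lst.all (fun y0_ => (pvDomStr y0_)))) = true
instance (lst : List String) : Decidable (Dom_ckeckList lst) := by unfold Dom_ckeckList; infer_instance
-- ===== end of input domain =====

-- B replaces A's two accumulator loops by two all() checks over the list and its mapped classes (same
-- cost, plainer); on lists where A's last-wins loop hides a class inconsistency B returns "Unkown"
-- (the intended difference D_ckeckList below).

-- s.split("/")[0]: split? with the nonempty separator "/" always returns some nonempty list, so this is exact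
def pvCls (s : String) : String := ((PySem.Str.split? s "/").getD []).headD ""

-- ===== PORT A =====
def pvStepA (ele : String) (st : Bool × List String) (item : String) : Bool × List String :=
  let cl := st.2 ++ [pvCls item]
  if ele ≠ item then (false, cl ++ [pvCls item]) else (st.1, cl)

def ckeckList (lst : List String) : String :=
  match lst with
  | [] => ""  -- lst[0] raises IndexError; excluded by Pre_ckeckList
  | ele :: _ =>
    if lst.length = 1 then ele
    else
      let st := lst.foldl (pvStepA ele) (true, [])
      if st.1 = false then
        let ele2 := st.2.headD ""  -- ClassList[0]; ClassList is nonempty here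
        -- the loop rebinds anno each iteration; ClassList is nonempty, so the init "" is never the result
        st.2.foldl (fun _ item => if ele2 ≠ item then "Unkown" else ele2) ""
      else ele

-- ===== PORT B =====
def ckeckList_alt (lst : List String) : String :=
  let hd := (PySem.List.pyGet? lst 0).getD ""  -- lst[0]; [] excluded by Pre_ckeckList
  if lst.all (fun x => x == hd) then hd
  else
    let classes := lst.map pvCls
    let c0 := (PySem.List.pyGet? classes 0).getD ""
    if classes.all (fun c => c == c0) then c0 else "Unkown"

-- ===== PRECONDITION & SPEC =====
-- Pre_ excludes only the empty list, on which both A and B raise IndexError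
def Pre_ckeckList (lst : List String) : Prop := lst ≠ []
instance (lst : List String) : Decidable (Pre_ckeckList lst) := by unfold Pre_ckeckList; infer_instance
def pvWitness_ckeckList : List String := (["DNA/hAT"])

-- On lists whose hits are not all identical but whose first and last classes agree while some middle
-- class differs (and the first class is not itself "Unkown"), A's last-wins loop returns the first class
-- even though class-level classification is inconsistent, while B returns "Unkown" as A's own comment intends.
def D_ckeckList (lst : List String) : Prop :=
  (∃ x ∈ lst, pvCls x ≠ pvCls (lst.headD "")) ∧
  pvCls (lst.getLastD "") = pvCls (lst.headD "") ∧ pvCls (lst.headD "") ≠ "Unkown"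
instance (lst : List String) : Decidable (D_ckeckList lst) := by unfold D_ckeckList; infer_instance

def Spec_ckeckList (lst : List String) (out : String) : Prop := ¬ D_ckeckList lst → out = ckeckList_alt lst
instance (lst : List String) (out : String) : Decidable (Spec_ckeckList lst out) := by unfold Spec_ckeckList; infer_instance

def pvDiffWitness_ckeckList : List String := (["DNA/hAT", "LINE/L1", "DNA/Tc1"])
def pvDiffWitnessOut_ckeckList : String × String := ("DNA", "Unkown")

-- ===== CLAIM (what is proved, stated in full; the proofs are below) =====
def Claim_unchanged_ckeckList : Prop := ∀ (lst : List String), Dom_ckeckList lst → Pre_ckeckList lst → Spec_ckeckList lst (ckeckList lst)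
def Claim_changed_ckeckList : Prop := Dom_ckeckList (pvDiffWitness_ckeckList) ∧ Pre_ckeckList (pvDiffWitness_ckeckList) ∧ D_ckeckList (pvDiffWitness_ckeckList) ∧ ckeckList (pvDiffWitness_ckeckList) = pvDiffWitnessOut_ckeckList.1 ∧ ckeckList_alt (pvDiffWitness_ckeckList) = pvDiffWitnessOut_ckeckList.2 ∧ pvDiffWitnessOut_ckeckList.1 ≠ pvDiffWitnessOut_ckeckList.2
def Claim_exact_ckeckList : Prop := ∀ (lst : List String), Dom_ckeckList lst → Pre_ckeckList lst → D_ckeckList lst → ckeckList lst ≠ ckeckList_alt lst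

-- ===== LEMMAS AND PROOFS =====

def pvSeg (ele : String) (it : String) : List String :=
  if ele ≠ it then [pvCls it, pvCls it] else [pvCls it]

lemma pvStepA_eq (ele : String) (st : Bool × List String) (item : String) :
    pvStepA ele st item =
      if ele = item then (st.1, st.2 ++ [pvCls item]) else (false, st.2 ++ [pvCls item, pvCls item]) := by
  unfold pvStepA
  by_cases h : ele = item <;> simp [h]

lemma foldA_eq (ele : String) : ∀ (l : List String) (b : Bool) (acc : List String),
    l.foldl (pvStepA ele) (b, acc) =
      (b && l.all (fun it => ele == it), acc ++ l.flatMap (pvSeg ele)) := by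
  intro l
  induction l with
  | nil =>
    intro b acc
    simp only [List.foldl_nil, List.all_nil, Bool.and_true, List.flatMap_nil, List.append_nil]
  | cons x l ih =>
    intro b acc
    rw [List.foldl_cons, pvStepA_eq]
    by_cases h : ele = x
    · rw [if_pos h, ih]
      simp [pvSeg, h]
    · rw [if_neg h, ih]
      simp [pvSeg, h, beq_false_of_ne h]

lemma pvSeg_ne_nil (ele it : String) : pvSeg ele it ≠ [] := by
  unfold pvSeg; split_ifs <;> simp

lemma flatMap_ne_nil (ele x : String) (l : List String) :
    (x :: l).flatMap (pvSeg ele) ≠ [] := by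
  have h1 : ((x :: l).flatMap (pvSeg ele)) = pvSeg ele x ++ (l.flatMap (pvSeg ele)) := by simp
  rw [h1]
  exact List.append_ne_nil_of_left_ne_nil (pvSeg_ne_nil ele x) _

lemma head_flatMap (ele x : String) (l : List String) :
    (((x :: l).flatMap (pvSeg ele)).headD "") = pvCls x := by
  unfold pvSeg
  by_cases h : ele = x <;> simp [h]

lemma last_flatMap (ele : String) : ∀ (l : List String) (x : String),
    ((x :: l).flatMap (pvSeg ele)).getLastD "" = pvCls ((x :: l).getLastD "") := by
  intro l
  induction l with
  | nil =>
    intro x; unfold pvSeg; by_cases h : ele = x <;> simp [h]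
  | cons y l ih =>
    intro x
    have h1 : ((x :: y :: l).flatMap (pvSeg ele)) = pvSeg ele x ++ ((y :: l).flatMap (pvSeg ele)) := by
      simp
    rw [h1, List.getLastD_eq_getLast?, List.getLastD_eq_getLast?,
      List.getLast?_append_of_ne_nil _ (flatMap_ne_nil ele y l),
      ← List.getLastD_eq_getLast?, ← List.getLastD_eq_getLast?, ih y]
    simp

lemma fold2_eq (e : String) : ∀ (l : List String) (a : String), l ≠ [] →
    l.foldl (fun _ item => if e ≠ item then "Unkown" else e) a =
      if e ≠ l.getLastD "" then "Unkown" else e := by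
  intro l
  induction l with
  | nil => intro a h; exact absurd rfl h
  | cons y l ih =>
    intro a _
    by_cases hl : l = []
    · subst hl; simp
    · rw [List.foldl_cons, ih _ hl]
      obtain ⟨z, m, rfl⟩ := List.exists_cons_of_ne_nil hl
      simp

-- A on a nonempty list, in closed form
lemma ckeckList_closed (x : String) (l : List String) :
    ckeckList (x :: l) =
      if (x :: l).all (fun it => x == it) then x
      else if pvCls x ≠ pvCls ((x :: l).getLastD "") then "Unkown" else pvCls x := by
  by_cases hl : l = []
  · subst hl; simp [ckeckList]
  · have hlen2 : (x :: l).length ≠ 1 := by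
      simp only [List.length_cons, ne_eq, Nat.add_eq_right]
      intro h; exact hl (List.eq_nil_of_length_eq_zero h)
    by_cases hall : (x :: l).all (fun it => x == it) = true
    · simp only [ckeckList, if_neg hlen2, foldA_eq, hall, Bool.true_and]
      simp [hall]
    · have hallf : (x :: l).all (fun it => x == it) = false :=
        Bool.eq_false_iff.mpr hall
      simp only [ckeckList, if_neg hlen2, foldA_eq, hallf, Bool.true_and, List.nil_append,
        head_flatMap]
      rw [fold2_eq _ _ _ (flatMap_ne_nil x x l), last_flatMap]
      simp

-- B on a nonempty list, in closed form
lemma ckeckList_alt_closed (x : String) (l : List String) :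
    ckeckList_alt (x :: l) =
      if (x :: l).all (fun it => it == x) then x
      else if ((x :: l).map pvCls).all (fun c => c == pvCls x) then pvCls x else "Unkown" := by
  simp [ckeckList_alt, PySem.List.pyGet?, PySem.List.pyIdx?]

lemma main_eq (x : String) (l : List String) (hD : ¬ D_ckeckList (x :: l)) :
    ckeckList (x :: l) = ckeckList_alt (x :: l) := by
  rw [ckeckList_closed, ckeckList_alt_closed]
  by_cases hall : ∀ y ∈ (x :: l), y = x
  · have h1 : (x :: l).all (fun it => x == it) = true := by
      simp only [List.all_eq_true, beq_iff_eq]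
      intro y hy; exact (hall y hy).symm
    have h2 : (x :: l).all (fun it => it == x) = true := by
      simp only [List.all_eq_true, beq_iff_eq]; exact hall
    rw [if_pos h1, if_pos h2]
  · push_neg at hall
    obtain ⟨w, hw, hwx⟩ := hall
    have h1 : (x :: l).all (fun it => x == it) = false := by
      simp only [List.all_eq_false]
      exact ⟨w, hw, by simp [Ne.symm hwx]⟩
    have h2 : (x :: l).all (fun it => it == x) = false := by
      simp only [List.all_eq_false]
      exact ⟨w, hw, by simp [hwx]⟩
    rw [if_neg (show ¬ (((x :: l).all fun it => x == it) = true) by rw [h1]; simp),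
      if_neg (show ¬ (((x :: l).all fun it => it == x) = true) by rw [h2]; simp)]
    have hhead : (x :: l).headD "" = x := rfl
    by_cases hlast : pvCls x = pvCls ((x :: l).getLastD "")
    · -- first and last class agree; ¬D forces either no class mismatch or first class = "Unkown"
      rw [if_neg (not_not_intro hlast)]
      by_cases hmis : ∃ y ∈ (x :: l), pvCls y ≠ pvCls x
      · obtain ⟨y, hy, hyc⟩ := hmis
        have hUnk : pvCls x = "Unkown" := by
          by_contra hne
          exact hD (by
            unfold D_ckeckList
            exact ⟨⟨y, hy, hyc⟩, hlast.symm, hne⟩)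
        have hf : ((x :: l).map pvCls).all (fun c => c == pvCls x) = false := by
          simp only [List.all_eq_false]
          exact ⟨pvCls y, List.mem_map_of_mem hy, by simp [hyc]⟩
        rw [if_neg (show ¬ ((((x :: l).map pvCls).all fun c => c == pvCls x) = true) by rw [hf]; simp), hUnk]
      · push_neg at hmis
        have ht : ((x :: l).map pvCls).all (fun c => c == pvCls x) = true := by
          simp only [List.all_eq_true, List.mem_map, beq_iff_eq]
          rintro c ⟨y, hy, rfl⟩; exact hmis y hy
        rw [if_pos ht]
    · -- first and last class differ: both sides are "Unkown"
      rw [if_pos hlast]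
      have hmem : (x :: l).getLastD "" ∈ (x :: l) := List.mem_of_getLast? rfl
      have hf : ((x :: l).map pvCls).all (fun c => c == pvCls x) = false := by
        simp only [List.all_eq_false]
        refine ⟨pvCls ((x :: l).getLastD ""), List.mem_map_of_mem hmem, ?_⟩
        simp only [beq_false_of_ne fun h => hlast h.symm]
        simp
      rw [if_neg (show ¬ ((((x :: l).map pvCls).all fun c => c == pvCls x) = true) by rw [hf]; simp)]

-- ===== VERDICT (by name: the statement is the Claim_ definition above) =====
theorem ckeckList_spec : Claim_unchanged_ckeckList := by
  intro lst _ hpre hD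
  obtain ⟨x, l, rfl⟩ := List.exists_cons_of_ne_nil hpre
  exact main_eq x l hD

theorem ckeckList_changed : Claim_changed_ckeckList := by
  unfold Claim_changed_ckeckList; decide

theorem ckeckList_tight : Claim_exact_ckeckList := by
  intro lst _ hpre hD
  obtain ⟨x, l, rfl⟩ := List.exists_cons_of_ne_nil hpre
  obtain ⟨⟨y, hy, hyc⟩, hlast, hUnk⟩ := hD
  simp only [List.headD_cons] at hlast hyc hUnk
  have hwx : y ≠ x := fun h => hyc (by rw [h])
  have hw : y ∈ x :: l := hy
  rw [ckeckList_closed, ckeckList_alt_closed]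
  have h1 : (x :: l).all (fun it => x == it) = false := by
    simp only [List.all_eq_false]
    exact ⟨y, hw, by simp only [beq_false_of_ne (Ne.symm hwx)]; simp⟩
  have h2 : (x :: l).all (fun it => it == x) = false := by
    simp only [List.all_eq_false]
    exact ⟨y, hw, by simp only [beq_false_of_ne hwx]; simp⟩
  have hf : ((x :: l).map pvCls).all (fun c => c == pvCls x) = false := by
    simp only [List.all_eq_false]
    exact ⟨pvCls y, List.mem_map_of_mem hy, by simp only [beq_false_of_ne hyc]; simp⟩
  rw [if_neg (show ¬ (((x :: l).all fun it => x == it) = true) by rw [h1]; simp),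
    if_neg (show ¬ (((x :: l).all fun it => it == x) = true) by rw [h2]; simp),
    if_neg (show ¬ (pvCls x ≠ pvCls ((x :: l).getLastD "")) from not_not_intro hlast.symm),
    if_neg (show ¬ ((((x :: l).map pvCls).all fun c => c == pvCls x) = true) by rw [hf]; simp)]
  exact hUnk
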